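-- pv_equiv track=rewrite | github.com/outenki/knowledge_decoupling | src/data_processing/tokenize_and_slice_data.py | group_texts_to_blocks
-- ===== SOURCE A (Python) =====
-- from itertools import chain
--
-- def group_texts_to_blocks(examples, block_size: int):
--     # 拼接为一个长序列后再切块
--     concatenated = list(chain.from_iterable(examples["input_ids"]))
--     total_length = (len(concatenated) // block_size) * block_size
--     input_blocks = [concatenated[i:i + block_size] for i in range(0, total_length, block_size)]
--     attention_blocks = [[1] * block_size for _ in input_blocks]
--
--     return {
--         "input_ids": input_blocks,
--         "attention_mask": attention_blocks,
--         "labels": [ids[:] for ids in input_blocks],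
--     }
-- ===== SOURCE B (Python) =====
-- def group_texts_to_blocks(examples, block_size: int):
--     # Single incremental pass: keep a running buffer, peel off full blocks as they form.
--     blocks = []
--     buf = []
--     for seq in examples["input_ids"]:
--         buf += seq
--         i = 0
--         while i + block_size <= len(buf):
--             blocks.append(buf[i:i + block_size])
--             i += block_size
--         buf = buf[i:]  # keep only the (< block_size) leftover
--     return {
--         "input_ids": blocks,
--         "attention_mask": [[1] * block_size for _ in blocks],
--         "labels": [list(b) for b in blocks],
--     }
-- ===== Notes on version B (the rewrite author's own statement) =====
-- stated objective: alternative
-- what changed: Instead of flattening all sequences and slicing the concatenation by a range of indices, B makes one incremental pass keeping a running buffer, peeling off each full block as soon as the buffer holds block_size tokens, so no full concatenated copy is ever built. Pre_ excludes block_size <= 0 (A raises ZeroDivisionError at 0, and for negative sizes A returns a degenerate empty result while B's peeling loop would not terminate) and inputs missing the 'input_ids' key (A raises KeyError).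
import Mathlib
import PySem

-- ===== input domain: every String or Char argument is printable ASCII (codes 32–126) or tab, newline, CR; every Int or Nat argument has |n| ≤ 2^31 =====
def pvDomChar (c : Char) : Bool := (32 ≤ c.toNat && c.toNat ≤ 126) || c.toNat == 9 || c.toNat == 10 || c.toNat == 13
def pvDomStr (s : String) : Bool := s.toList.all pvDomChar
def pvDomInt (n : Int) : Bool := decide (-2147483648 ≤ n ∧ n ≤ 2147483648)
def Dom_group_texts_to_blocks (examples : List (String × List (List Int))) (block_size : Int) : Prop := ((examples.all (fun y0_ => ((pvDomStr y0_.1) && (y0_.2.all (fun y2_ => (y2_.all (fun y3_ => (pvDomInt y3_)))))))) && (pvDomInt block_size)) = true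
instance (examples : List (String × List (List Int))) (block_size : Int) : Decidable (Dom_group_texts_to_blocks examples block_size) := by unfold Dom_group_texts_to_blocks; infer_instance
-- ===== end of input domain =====

-- B replaces flatten-then-slice-by-range with one incremental pass over the sequences that
-- peels off each full block from a running buffer (objective: alternative decomposition).

-- ===== PORT A =====
def group_texts_to_blocks (examples : List (String × List (List Int))) (block_size : Int) : List (String × List (List Int)) :=
  -- concatenated = list(chain.from_iterable(examples["input_ids"]))   (KeyError excluded by Pre_)
  let concatenated := ((List.lookup "input_ids" examples).getD []).flatten
  -- total_length = (len(concatenated) // block_size) * block_size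
  let total_length := PySem.Int.floordiv (concatenated.length : Int) block_size * block_size
  -- input_blocks = [concatenated[i:i+block_size] for i in range(0, total_length, block_size)]
  let input_blocks := (PySem.List.pyRange 0 total_length block_size).map
    (fun i => PySem.List.slice concatenated (some i) (some (i + block_size)))
  -- attention_blocks = [[1] * block_size for _ in input_blocks]   ([1]*n is empty for n ≤ 0, exactly toNat)
  let attention_blocks := input_blocks.map (fun _ => List.replicate block_size.toNat (1 : Int))
  [("input_ids", input_blocks),
   ("attention_mask", attention_blocks),
   ("labels", input_blocks.map (fun ids => PySem.List.slice ids none none))]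

-- ===== PORT B =====
-- while i + block_size <= len(buf): blocks.append(buf[i:i+block_size]); i += block_size
-- buf[i:i+bs] with 0 ≤ i is exactly (buf.drop i).take bs (both clamp past the end).
-- The '0 < bs' conjunct only makes the loop total; within Pre_ (0 < block_size) it always holds.
def pvEmitLoop (buf : List Int) (bs : Nat) (blocks : List (List Int)) (i : Nat) : List (List Int) × Nat :=
  if _h : 0 < bs ∧ i + bs ≤ buf.length then
    pvEmitLoop buf bs (blocks ++ [(buf.drop i).take bs]) (i + bs)
  else (blocks, i)
termination_by buf.length - i
decreasing_by omega

def group_texts_to_blocks_alt (examples : List (String × List (List Int))) (block_size : Int) : List (String × List (List Int)) :=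
  let bs := block_size.toNat
  let seqs := (List.lookup "input_ids" examples).getD []
  let st := seqs.foldl (fun (st : List (List Int) × List Int) seq =>
      let buf := st.2 ++ seq
      let r := pvEmitLoop buf bs st.1 0
      (r.1, buf.drop r.2)) ([], [])
  [("input_ids", st.1),
   ("attention_mask", st.1.map (fun _ => List.replicate bs (1 : Int))),
   ("labels", st.1.map (fun b => b))]

-- ===== PRECONDITION & SPEC =====
-- Pre_ excludes block_size ≤ 0 (A raises ZeroDivisionError at 0, and for negative sizes A returns a
-- degenerate empty result while B's peeling loop would not terminate) and inputs without an
-- "input_ids" key (A raises KeyError).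
def Pre_group_texts_to_blocks (examples : List (String × List (List Int))) (block_size : Int) : Prop :=
  (List.lookup "input_ids" examples) ≠ none ∧ 0 < block_size
instance (examples : List (String × List (List Int))) (block_size : Int) : Decidable (Pre_group_texts_to_blocks examples block_size) := by unfold Pre_group_texts_to_blocks; infer_instance

def pvWitness_group_texts_to_blocks : (List (String × List (List Int))) × Int :=
  ([("input_ids", [[1, 2], [3]])], 2)

def Spec_group_texts_to_blocks (examples : List (String × List (List Int))) (block_size : Int) (out : List (String × List (List Int))) : Prop := out = group_texts_to_blocks_alt examples block_size
instance (examples : List (String × List (List Int))) (block_size : Int) (out : List (String × List (List Int))) : Decidable (Spec_group_texts_to_blocks examples block_size out) := by unfold Spec_group_texts_to_blocks; infer_instance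

-- ===== CLAIM (what is proved, stated in full; the proofs are below) =====
def Claim_equal_group_texts_to_blocks : Prop := ∀ (examples : List (String × List (List Int))) (block_size : Int), Dom_group_texts_to_blocks examples block_size → Pre_group_texts_to_blocks examples block_size → Spec_group_texts_to_blocks examples block_size (group_texts_to_blocks examples block_size)

-- ===== LEMMAS AND PROOFS =====

-- The common mathematical object: the list of full bs-sized chunks of l, and the leftover.
def pvChunk (bs : Nat) (l : List Int) : List (List Int) :=
  if _h : 0 < bs ∧ bs ≤ l.length then l.take bs :: pvChunk bs (l.drop bs) else []
termination_by l.length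
decreasing_by simp; omega

def pvRem (bs : Nat) (l : List Int) : List Int := l.drop (bs * (pvChunk bs l).length)

theorem pvChunk_pos {bs : Nat} {l : List Int} (hbs : 0 < bs) (hl : bs ≤ l.length) :
    pvChunk bs l = l.take bs :: pvChunk bs (l.drop bs) := by
  rw [pvChunk]; simp [hbs, hl]

theorem pvChunk_small {bs : Nat} {l : List Int} (h : ¬(0 < bs ∧ bs ≤ l.length)) :
    pvChunk bs l = [] := by
  rw [pvChunk]; simp [h]

theorem pvRem_pos {bs : Nat} {l : List Int} (hbs : 0 < bs) (hl : bs ≤ l.length) :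
    pvRem bs l = pvRem bs (l.drop bs) := by
  unfold pvRem
  rw [pvChunk_pos hbs hl]
  simp [Nat.mul_succ, List.drop_drop]
  ring_nf

theorem pvRem_small {bs : Nat} {l : List Int} (h : ¬(0 < bs ∧ bs ≤ l.length)) :
    pvRem bs l = l := by
  unfold pvRem; rw [pvChunk_small h]; simp

theorem pvEmitLoop_eq (buf : List Int) (bs : Nat) (blocks : List (List Int)) (i : Nat) :
    pvEmitLoop buf bs blocks i =
      (blocks ++ pvChunk bs (buf.drop i), i + bs * (pvChunk bs (buf.drop i)).length) := by
  fun_induction pvEmitLoop buf bs blocks i with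
  | case1 blocks i h ih =>
    obtain ⟨hbs, hle⟩ := h
    have hx : pvChunk bs (buf.drop i) = (buf.drop i).take bs :: pvChunk bs ((buf.drop i).drop bs) :=
      pvChunk_pos hbs (by simp; omega)
    rw [ih, hx]
    refine Prod.ext ?_ ?_
    · simp [List.drop_drop]
    · simp [List.drop_drop, Nat.mul_succ]
      omega
  | case2 blocks i h =>
    rw [pvChunk_small (by simp; omega)]
    simp

theorem pvChunk_append (bs : Nat) (hbs : 0 < bs) (L s : List Int) :
    pvChunk bs (L ++ s) = pvChunk bs L ++ pvChunk bs (pvRem bs L ++ s) ∧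
    pvRem bs (L ++ s) = pvRem bs (pvRem bs L ++ s) := by
  by_cases h : bs ≤ L.length
  · have ih := pvChunk_append bs hbs (L.drop bs) s
    have htk : (L ++ s).take bs = L.take bs := List.take_append_of_le_length h
    have hdr : (L ++ s).drop bs = L.drop bs ++ s := List.drop_append_of_le_length h
    have h1 : pvChunk bs (L ++ s) = L.take bs :: pvChunk bs (L.drop bs ++ s) := by
      rw [pvChunk_pos hbs (by simp; omega), htk, hdr]
    have h2 : pvRem bs (L ++ s) = pvRem bs (L.drop bs ++ s) := by
      rw [pvRem_pos hbs (by simp; omega), hdr]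
    constructor
    · rw [h1, ih.1, pvChunk_pos hbs h, pvRem_pos hbs h]
      simp
    · rw [h2, ih.2, pvRem_pos hbs h]
  · have hL : ¬ (0 < bs ∧ bs ≤ L.length) := by omega
    rw [pvChunk_small hL, pvRem_small hL]
    simp
termination_by L.length
decreasing_by simp; omega

theorem pvFold_eq (bs : Nat) (hbs : 0 < bs) (seqs : List (List Int)) (L : List Int) :
    seqs.foldl (fun (st : List (List Int) × List Int) seq =>
      let buf := st.2 ++ seq
      let r := pvEmitLoop buf bs st.1 0
      (r.1, buf.drop r.2)) (pvChunk bs L, pvRem bs L)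
    = (pvChunk bs (L ++ seqs.flatten), pvRem bs (L ++ seqs.flatten)) := by
  induction seqs generalizing L with
  | nil => simp
  | cons s rest ih =>
    rw [List.foldl_cons]
    have hstep : (let buf := (pvChunk bs L, pvRem bs L).2 ++ s
        let r := pvEmitLoop buf bs (pvChunk bs L, pvRem bs L).1 0
        (r.1, List.drop r.2 buf))
        = (pvChunk bs (L ++ s), pvRem bs (L ++ s)) := by
      simp only [pvEmitLoop_eq, List.drop_zero, Nat.zero_add]
      refine Prod.ext ?_ ?_
      · exact ((pvChunk_append bs hbs L s).1).symm
      · show (pvRem bs L ++ s).drop (bs * (pvChunk bs (pvRem bs L ++ s)).length)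
            = pvRem bs (L ++ s)
        rw [(pvChunk_append bs hbs L s).2]
        rfl
    rw [hstep, ih (L ++ s)]
    simp

theorem pvRange_eq (bs : Nat) (hbs : 0 < bs) (l : List Int) :
    ∀ k, k = l.length / bs →
      (List.range k).map (fun j => (l.drop (bs * j)).take bs) = pvChunk bs l := by
  intro k
  induction k generalizing l with
  | zero =>
    intro hk
    have hlt : l.length < bs := by
      rcases Nat.lt_or_ge l.length bs with h | h
      · exact h
      · exfalso
        have := (Nat.one_le_div_iff hbs).mpr h
        omega
    rw [pvChunk_small (by omega)]
    simp
  | succ k ih =>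
    intro hk
    have hm := Nat.div_add_mod l.length bs
    have hmod := Nat.mod_lt l.length hbs
    have hble : bs ≤ l.length := by
      rcases Nat.lt_or_ge l.length bs with h | h
      · rw [Nat.div_eq_of_lt h] at hk; omega
      · exact h
    have hrec : k = (l.drop bs).length / bs := by
      rw [← hk] at hm
      have hx : bs * (k + 1) = bs * k + bs := by ring
      have hlen : (l.drop bs).length = bs * k + l.length % bs := by
        simp; omega
      rw [hlen, Nat.mul_add_div hbs, Nat.div_eq_of_lt hmod]
      omega
    rw [List.range_succ_eq_map, List.map_cons, List.map_map]
    have hshift : ∀ j : Nat, (l.drop (bs * (j + 1))).take bs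
        = ((l.drop bs).drop (bs * j)).take bs := by
      intro j
      rw [List.drop_drop]
      ring_nf
    have : (List.range k).map ((fun j => (l.drop (bs * j)).take bs) ∘ Nat.succ)
        = (List.range k).map (fun j => ((l.drop bs).drop (bs * j)).take bs) := by
      refine List.map_congr_left ?_
      intro j _
      exact hshift j
    rw [this, ih (l.drop bs) hrec, pvChunk_pos hbs hble]
    simp

theorem pvA_blocks (l : List Int) (block_size : Int) (hbs : 0 < block_size) :
    (PySem.List.pyRange 0 (PySem.Int.floordiv (l.length : Int) block_size * block_size) block_size).map
      (fun i => PySem.List.slice l (some i) (some (i + block_size)))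
    = pvChunk block_size.toNat l := by
  have hcast : block_size = (block_size.toNat : Int) := (Int.toNat_of_nonneg hbs.le).symm
  rw [hcast]
  generalize block_size.toNat = bs at *
  have hbsn : 0 < bs := by omega
  rw [PySem.Int.floordiv_natCast]
  obtain ⟨k, hk⟩ : ∃ k, k = l.length / bs := ⟨_, rfl⟩
  rw [← hk]
  have hmul : ((k : Nat) : Int) * (bs : Int) = ((k * bs : Nat) : Int) := by push_cast; ring
  rw [hmul, PySem.List.pyRange_of_pos 0 ((k * bs : Nat) : Int) (by exact_mod_cast hbsn)]
  have hcount : (if (0 : Int) < ((k * bs : Nat) : Int)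
      then ((((k * bs : Nat) : Int) - 0 + (bs : Int) - 1) / (bs : Int)).toNat else 0) = k := by
    by_cases hk0 : k = 0
    · rw [hk0]
      simp
    · have hpos' : (0 : Int) < ((k * bs : Nat) : Int) := by
        have : 0 < k * bs := Nat.mul_pos (by omega) hbsn
        exact_mod_cast this
      rw [if_pos hpos']
      have he : (((k * bs : Nat) : Int) - 0 + (bs : Int) - 1)
          = ((k * bs + bs - 1 : Nat) : Int) := by
        omega
      rw [he, ← Int.natCast_ediv]
      have hn : (k * bs + bs - 1) / bs = k := by
        have h1 : k * bs + bs - 1 = bs * k + (bs - 1) := by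
          rw [Nat.mul_comm]; omega
        rw [h1, Nat.mul_add_div hbsn, Nat.div_eq_of_lt (by omega)]
        omega
      simp [hn]
  rw [hcount, List.map_map]
  have hcg : (List.range k).map
        ((fun i => PySem.List.slice l (some i) (some (i + (bs : Int)))) ∘ (fun j : Nat => 0 + (bs : Int) * (j : Int)))
      = (List.range k).map (fun j => (l.drop (bs * j)).take bs) := by
    refine List.map_congr_left ?_
    intro j _
    have h1 : (0 + (bs : Int) * (j : Int)) = ((bs * j : Nat) : Int) := by push_cast; ring
    have h2 : (0 + (bs : Int) * (j : Int) + (bs : Int)) = (((bs * j : Nat) : Int) + ((bs : Nat) : Int)) := by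
      push_cast; ring
    simp only [Function.comp_apply, h1]
    exact PySem.List.slice_natCast_add l (bs * j) bs
  rw [hcg]
  exact pvRange_eq bs hbsn l k hk

-- ===== VERDICT (by name: the statement is the Claim_ definition above) =====
theorem group_texts_to_blocks_spec : Claim_equal_group_texts_to_blocks := by
  intro examples block_size _hdom hpre
  obtain ⟨hkey, hpos⟩ := hpre
  unfold Spec_group_texts_to_blocks group_texts_to_blocks group_texts_to_blocks_alt
  simp only []
  have hbsn : 0 < block_size.toNat := by omega
  have hA := pvA_blocks ((List.lookup "input_ids" examples).getD []).flatten block_size hpos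
  have hinit : (([], []) : List (List Int) × List Int)
      = (pvChunk block_size.toNat [], pvRem block_size.toNat []) := by
    have hns : ¬ (0 < block_size.toNat ∧ block_size.toNat ≤ ([] : List Int).length) := by
      simp
    rw [pvChunk_small hns]
    simp [pvRem, pvChunk_small hns]
  have hB := pvFold_eq block_size.toNat hbsn ((List.lookup "input_ids" examples).getD []) []
  rw [hA]
  rw [hinit, hB]
  simp [PySem.List.slice_none_none]
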